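-- pv_equiv track=rewrite | github.com/Emi-B-Dazed/Homework | Vector_Addition_Project/Project1-main/ebardwel_p2.py | build_files_matrix
-- ===== SOURCE A (Python) =====
-- def build_files_matrix(files):
--     retmatrix = []
--     leng = len(files) - 1
--     temp = leng
--     for i in range(len(files)):
--         retmatrix.append([])
--         for j in range(len(files) - i):
--             retmatrix[i].append(leng)
--             leng -= 1
--         leng = temp
--     return retmatrix
-- ===== SOURCE B (Python) =====
-- def build_files_matrix(files):
--     # Grow the matrix incrementally: for each new value v, append v to every
--     # existing (ascending) row and start a new row [v]; finally reverse each
--     # row to get the descending order.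
--     rev_rows = []
--     for v in range(len(files)):
--         for row in rev_rows:
--             row.append(v)
--         rev_rows.append([v])
--     return [row[::-1] for row in rev_rows]
-- ===== Notes on version B (the rewrite author's own statement) =====
-- stated objective: alternative
-- what changed: Instead of A's nested decrement-and-reset loops that fill each row top-down, B grows the matrix incrementally: for each new value v it appends v to every existing ascending row and starts a new row [v], then reverses each row once at the end.
import Mathlib
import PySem

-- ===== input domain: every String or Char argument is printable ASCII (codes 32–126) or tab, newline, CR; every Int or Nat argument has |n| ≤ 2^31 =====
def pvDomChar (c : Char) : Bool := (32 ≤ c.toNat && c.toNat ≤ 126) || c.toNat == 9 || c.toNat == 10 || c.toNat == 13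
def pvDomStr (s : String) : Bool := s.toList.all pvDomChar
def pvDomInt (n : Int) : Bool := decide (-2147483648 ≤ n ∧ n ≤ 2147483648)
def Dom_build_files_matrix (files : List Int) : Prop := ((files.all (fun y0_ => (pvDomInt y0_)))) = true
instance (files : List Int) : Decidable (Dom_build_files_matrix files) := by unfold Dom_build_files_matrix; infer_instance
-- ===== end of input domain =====

-- B grows the matrix incrementally (prepend the new value to every row, append a new
-- singleton row) instead of A's nested decrement-and-reset fill (objective: alternative).

-- ===== PORT A =====
-- retmatrix[i].append(x): mutate the last row in place (row i is always the last one appended)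
def pvAppendLast (m : List (List Int)) (x : Int) : List (List Int) :=
  m.dropLast ++ [m.getLastD [] ++ [x]]

def build_files_matrix (files : List Int) : List (List Int) :=
  let n : Int := files.length
  let leng0 : Int := n - 1
  let temp : Int := leng0
  ((PySem.List.pyRange 0 n 1).foldl
    (fun (st : List (List Int) × Int) i =>
      let st1 : List (List Int) × Int := (st.1 ++ [[]], st.2)
      let st2 := (PySem.List.pyRange 0 (n - i) 1).foldl
        (fun (s : List (List Int) × Int) _ => (pvAppendLast s.1 s.2, s.2 - 1)) st1
      (st2.1, temp))
    ([], leng0)).1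

-- ===== PORT B =====
def build_files_matrix_alt (files : List Int) : List (List Int) :=
  ((PySem.List.pyRange 0 (files.length : Int) 1).foldl
    (fun m v => m.map (fun row => row ++ [v]) ++ [[v]]) []).map
    (fun row => (PySem.List.slice? row none none (-1)).getD [])  -- row[::-1]

-- ===== PRECONDITION & SPEC =====
def Spec_build_files_matrix (files : List Int) (out : List (List Int)) : Prop := out = build_files_matrix_alt files
instance (files : List Int) (out : List (List Int)) : Decidable (Spec_build_files_matrix files out) := by unfold Spec_build_files_matrix; infer_instance

-- ===== CLAIM (what is proved, stated in full; the proofs are below) =====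
def Claim_equal_build_files_matrix : Prop := ∀ (files : List Int), Dom_build_files_matrix files → Spec_build_files_matrix files (build_files_matrix files)

-- ===== LEMMAS AND PROOFS =====

-- canonical matrix: row i = [n-1, n-2, ..., i]
def pvCanon (n : Nat) : List (List Int) :=
  (List.range n).map (fun i => (List.range (n - i)).map (fun (j : Nat) => (n : Int) - 1 - (j : Int)))

theorem pvAppendLast_concat (acc : List (List Int)) (r : List Int) (x : Int) :
    pvAppendLast (acc ++ [r]) x = acc ++ [r ++ [x]] := by
  simp [pvAppendLast]

-- the inner loop of A: appends L, L-1, …, decrementing; it ignores the loop variable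
theorem pv_inner_fold (l : List Int) (acc : List (List Int)) (r : List Int) (L : Int) :
    l.foldl (fun (s : List (List Int) × Int) _ => (pvAppendLast s.1 s.2, s.2 - 1)) (acc ++ [r], L)
      = (acc ++ [r ++ PySem.List.pyRange L (L - (l.length : Int)) (-1)], L - (l.length : Int)) := by
  induction l generalizing r L with
  | nil => simp [PySem.List.pyRange_neg_one_eq_nil]
  | cons x t ih =>
    simp only [List.foldl_cons, pvAppendLast_concat, List.length_cons]
    rw [ih, Prod.mk.injEq]
    have hstop : L - ((t.length + 1 : Nat) : Int) = (L - 1) - (t.length : Int) := by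
      push_cast; ring
    constructor
    · have hc : PySem.List.pyRange L (L - ((t.length + 1 : Nat) : Int)) (-1)
          = L :: PySem.List.pyRange (L - 1) ((L - 1) - (t.length : Int)) (-1) := by
        rw [PySem.List.pyRange_neg_one_cons (by push_cast; omega), hstop]
      rw [hc]; simp
    · rw [hstop]

-- the outer loop of A: each iteration appends one full descending row and resets leng
theorem pv_outer_fold (n : Int) (l : List Int) (acc : List (List Int)) :
    l.foldl
      (fun (st : List (List Int) × Int) i =>
        let st1 : List (List Int) × Int := (st.1 ++ [[]], st.2)
        let st2 := (PySem.List.pyRange 0 (n - i) 1).foldl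
          (fun (s : List (List Int) × Int) _ => (pvAppendLast s.1 s.2, s.2 - 1)) st1
        (st2.1, n - 1))
      (acc, n - 1)
      = (acc ++ l.map (fun i =>
          PySem.List.pyRange (n - 1) ((n - 1) - (((n - i).toNat : Nat) : Int)) (-1)), n - 1) := by
  induction l generalizing acc with
  | nil => simp
  | cons x t ih =>
    simp only [List.foldl_cons, List.map_cons]
    rw [show acc ++ [[]] = acc ++ [([] : List Int)] from rfl]
    rw [pv_inner_fold (PySem.List.pyRange 0 (n - x) 1) acc [] (n - 1)]
    simp only [PySem.List.length_pyRange_one, List.nil_append]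
    rw [ih]
    simp

-- A computes the canonical matrix
theorem pvA_eq_canon (files : List Int) :
    build_files_matrix files = pvCanon files.length := by
  unfold build_files_matrix pvCanon
  simp only []
  rw [pv_outer_fold (files.length : Int) (PySem.List.pyRange 0 (files.length : Int) 1) []]
  simp only [List.nil_append]
  rw [PySem.List.pyRange_one]
  rw [List.map_map]
  apply List.map_congr_left
  intro i hi
  rw [List.mem_range] at hi
  simp only [Function.comp]
  rw [PySem.List.pyRange_neg_one]
  have h1 : (((files.length : Int) - (0 + (i : Int))).toNat : Int) = ((files.length - i : Nat) : Int) := by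
    omega
  rw [h1]
  have h2 : ((files.length : Int) - 1 - ((files.length - i : Nat) : Int)) = ((files.length : Int) - 1) - ((files.length - i : Nat) : Int) := rfl
  have h3 : (((files.length : Int) - 1 - (((files.length : Int) - 1) - ((files.length - i : Nat) : Int))).toNat) = files.length - i := by
    omega
  rw [h3]

-- one step of B: from the canonical k-matrix to the canonical (k+1)-matrix
theorem pv_canon_step (k : Nat) :
    (pvCanon k).map (fun row => (k : Int) :: row) ++ [[(k : Int)]] = pvCanon (k + 1) := by
  unfold pvCanon
  rw [List.range_succ, List.map_append, List.map_map]
  congr 1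
  · apply List.map_congr_left
    intro i hi
    rw [List.mem_range] at hi
    simp only [Function.comp]
    have h : k + 1 - i = (k - i) + 1 := by omega
    rw [h, List.range_succ_eq_map, List.map_cons, List.map_map]
    congr 1
    · push_cast; ring
    · apply List.map_congr_left
      intro j _
      simp only [Function.comp, Nat.succ_eq_add_one]
      push_cast; ring
  · simp

-- one step of B's fold in reversed (ascending) form
theorem pv_canon_rev_step (k : Nat) :
    ((pvCanon k).map List.reverse).map (fun row => row ++ [(k : Int)]) ++ [[(k : Int)]]
      = (pvCanon (k + 1)).map List.reverse := by
  rw [← pv_canon_step k, List.map_append, List.map_map, List.map_map]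
  congr 1
  apply List.map_congr_left
  intro r _
  simp

-- B's fold builds the canonical matrix with each row reversed (ascending)
theorem pvB_fold_eq (n : Nat) :
    (List.range n).foldl
      (fun (m : List (List Int)) (v : Nat) =>
        m.map (fun row => row ++ [((0 : Int) + v)]) ++ [[((0 : Int) + v)]]) []
      = (pvCanon n).map List.reverse := by
  induction n with
  | zero => simp [pvCanon]
  | succ k ih =>
    rw [List.range_succ, List.foldl_append, ih, List.foldl_cons, List.foldl_nil]
    have h0 : ((0 : Int) + (k : Int)) = (k : Int) := by ring
    rw [h0, pv_canon_rev_step]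

-- B computes the canonical matrix
theorem pvB_eq_canon (files : List Int) :
    build_files_matrix_alt files = pvCanon files.length := by
  unfold build_files_matrix_alt
  rw [PySem.List.pyRange_one]
  have h : ((files.length : Int) - 0).toNat = files.length := by omega
  rw [h, List.foldl_map, pvB_fold_eq, List.map_map]
  simp [PySem.List.slice?_none_none_neg_one]

-- ===== VERDICT (by name: the statement is the Claim_ definition above) =====
theorem build_files_matrix_spec : Claim_equal_build_files_matrix := by
  intro files _
  unfold Spec_build_files_matrix
  rw [pvA_eq_canon, pvB_eq_canon]
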